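-- pv_equiv track=rewrite | github.com/YoonhaHong/ITS-Telescope | apts-dpts-ce65-daq-software-master/analysis/dpts/source_decoder.py | get_all_gids_pids
-- ===== SOURCE A (Python) =====
-- def get_all_gids_pids(all_gps):
--     gids_all = []
--     pids_all = []
--     for element in all_gps:
--         for gps in element:
--             gids_all.append(gps[0])
--             pids_all.append(gps[1])
--     return gids_all, pids_all
-- ===== SOURCE B (Python) =====
-- def get_all_gids_pids(all_gps):
--     flat = [gps for element in all_gps for gps in element]
--     if not flat:
--         return [], []
--     cols = list(zip(*flat))
--     return list(cols[0]), list(cols[1])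
-- ===== Notes on version B (the rewrite author's own statement) =====
-- stated objective: idiomatic
-- what changed: Replaces the per-pair double append loop with flatten-then-transpose: one flattened list, then zip(*) to split it into the two columns.
import Mathlib
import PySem

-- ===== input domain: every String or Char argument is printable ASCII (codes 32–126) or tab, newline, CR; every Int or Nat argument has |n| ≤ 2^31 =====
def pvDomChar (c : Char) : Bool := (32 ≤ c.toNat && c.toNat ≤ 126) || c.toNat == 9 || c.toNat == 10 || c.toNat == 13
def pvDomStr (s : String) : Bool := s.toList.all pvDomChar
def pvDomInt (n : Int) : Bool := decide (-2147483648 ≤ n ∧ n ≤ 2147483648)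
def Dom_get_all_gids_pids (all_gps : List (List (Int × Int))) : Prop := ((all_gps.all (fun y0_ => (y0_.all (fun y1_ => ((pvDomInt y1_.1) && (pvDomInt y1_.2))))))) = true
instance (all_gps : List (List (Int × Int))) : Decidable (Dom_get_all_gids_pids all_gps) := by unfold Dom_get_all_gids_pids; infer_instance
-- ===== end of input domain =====

-- ===== PORT A =====
def get_all_gids_pids (all_gps : List (List (Int × Int))) : List Int × List Int :=
  all_gps.foldl (fun st element =>
    element.foldl (fun st gps => (st.1 ++ [gps.1], st.2 ++ [gps.2])) st) ([], [])

-- ===== PORT B =====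
-- flatten, then transpose: empty guard, then the two columns of zip(*flat)
def get_all_gids_pids_alt (all_gps : List (List (Int × Int))) : List Int × List Int :=
  let flat := all_gps.flatMap (fun element => element)
  if flat = [] then ([], [])
  else (flat.map Prod.fst, flat.map Prod.snd)

-- ===== PRECONDITION & SPEC =====
def Spec_get_all_gids_pids (all_gps : List (List (Int × Int))) (out : List Int × List Int) : Prop := out = get_all_gids_pids_alt all_gps
instance (all_gps : List (List (Int × Int))) (out : List Int × List Int) : Decidable (Spec_get_all_gids_pids all_gps out) := by unfold Spec_get_all_gids_pids; infer_instance

-- ===== CLAIM (what is proved, stated in full; the proofs are below) =====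
def Claim_equal_get_all_gids_pids : Prop := ∀ (all_gps : List (List (Int × Int))), Dom_get_all_gids_pids all_gps → Spec_get_all_gids_pids all_gps (get_all_gids_pids all_gps)

-- ===== LEMMAS AND PROOFS =====

-- ===== VERDICT (by name: the statement is the Claim_ definition above) =====
lemma loop_char (all_gps : List (List (Int × Int))) (g p : List Int) :
    all_gps.foldl (fun st element =>
      element.foldl (fun st gps => (st.1 ++ [gps.1], st.2 ++ [gps.2])) st) (g, p)
    = (g ++ (all_gps.flatMap (fun e => e)).map Prod.fst,
       p ++ (all_gps.flatMap (fun e => e)).map Prod.snd) := by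
  induction all_gps generalizing g p with
  | nil => simp
  | cons e rest ih =>
    have inner : ∀ (e : List (Int × Int)) (g p : List Int),
        e.foldl (fun st gps => (st.1 ++ [gps.1], st.2 ++ [gps.2])) (g, p)
        = (g ++ e.map Prod.fst, p ++ e.map Prod.snd) := by
      intro e
      induction e with
      | nil => simp
      | cons x xs ihx => intro g p; simp [ihx]
    rw [List.foldl_cons, inner, ih]
    simp [List.flatMap_cons]

theorem get_all_gids_pids_spec : Claim_equal_get_all_gids_pids := by
  intro all_gps _
  unfold Spec_get_all_gids_pids get_all_gids_pids get_all_gids_pids_alt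
  rw [loop_char]
  by_cases h : all_gps.flatMap (fun e => e) = [] <;> simp [h]
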